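-- pv_equiv track=rewrite | github.com/frosty865/PSA-Toolbox | tools/cisa-site-assessment/app/importers/baseline_canon_mapper.py | detect_question_text_column
-- ===== SOURCE A (Python) =====
-- from typing import Dict, List, Optional, Any
--
-- def detect_question_text_column(columns: List[Dict]) -> Optional[str]:
--     """Detect question text column from column list."""
--     candidates = []
--
--     for col in columns:
--         name_lower = col['name'].lower()
--         if any(term in name_lower for term in ['question_text', 'question', 'prompt', 'text']):
--             candidates.append(col['name'])
--
--     # Prefer exact matches
--     for col in columns:
--         if col['name'].lower() in ['question_text', 'text', 'prompt']:
--             return col['name']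
--
--     # Return first candidate
--     return candidates[0] if candidates else None
-- ===== SOURCE B (Python) =====
-- def detect_question_text_column(columns):
--     """Detect question text column from column list (single pass)."""
--     first_exact = None
--     first_candidate = None
--     exact = {'question_text', 'text', 'prompt'}
--     terms = ('question_text', 'question', 'prompt', 'text')
--     for col in columns:
--         name = col['name']
--         low = name.lower()
--         if first_exact is None and low in exact:
--             first_exact = name
--         if first_candidate is None and any(t in low for t in terms):
--             first_candidate = name
--     return first_exact if first_exact is not None else first_candidate
-- ===== Notes on version B (the rewrite author's own statement) =====
-- stated objective: simpler
-- what changed: Replaces A's two traversals (one building a full candidate list, one scanning for an exact match) by a single pass that keeps only the first exact match and the first candidate in two Optional variables.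
import Mathlib
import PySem

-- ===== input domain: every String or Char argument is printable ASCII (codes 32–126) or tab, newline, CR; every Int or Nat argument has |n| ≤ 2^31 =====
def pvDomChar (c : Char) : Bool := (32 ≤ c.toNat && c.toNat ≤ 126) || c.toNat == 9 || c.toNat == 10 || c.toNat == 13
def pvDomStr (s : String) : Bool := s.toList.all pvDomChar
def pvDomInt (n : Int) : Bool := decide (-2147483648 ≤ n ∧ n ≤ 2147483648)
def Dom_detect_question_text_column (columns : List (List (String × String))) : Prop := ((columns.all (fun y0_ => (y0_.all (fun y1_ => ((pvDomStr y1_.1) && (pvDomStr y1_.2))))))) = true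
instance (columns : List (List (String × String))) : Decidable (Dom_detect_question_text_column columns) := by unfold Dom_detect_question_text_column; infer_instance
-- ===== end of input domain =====

-- B merges A's two traversals into a single pass keeping the first exact match and the first
-- candidate; same return value on every input where A returns (Pre_ excludes KeyError inputs).

-- ===== PORT A =====
-- col['name'] (Pre_ guarantees the key is present, so the getD default is never used)
def pvName (col : List (String × String)) : String :=
  ((PySem.Dict.mk col).get? "name").getD ""

-- any(term in name_lower for term in [...]) in A's first loop
def pvCandStep (acc : List String) (col : List (String × String)) : List String :=
  let name_lower := PySem.Str.lower (pvName col)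
  if ["question_text", "question", "prompt", "text"].any
      (fun term => PySem.Str.isIn term name_lower) then
    acc ++ [pvName col]
  else acc

-- col['name'].lower() in ['question_text', 'text', 'prompt'] in A's second loop
def pvExactP (col : List (String × String)) : Bool :=
  ["question_text", "text", "prompt"].contains (PySem.Str.lower (pvName col))

def detect_question_text_column (columns : List (List (String × String))) : Option String :=
  -- first loop: collect candidates
  let candidates := columns.foldl pvCandStep []
  -- second loop: prefer exact matches (early return)
  match columns.find? pvExactP with
  | some col => some (pvName col)
  | none => candidates.head?

-- ===== PORT B =====
def pvAltStep (st : Option String × Option String) (col : List (String × String)) :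
    Option String × Option String :=
  let name := pvName col
  let low := PySem.Str.lower name
  let e := if st.1.isNone &&
      (PySem.Set.ofList ["question_text", "text", "prompt"]).contains low then some name else st.1
  let c := if st.2.isNone &&
      ["question_text", "question", "prompt", "text"].any (fun t => PySem.Str.isIn t low) then
      some name else st.2
  (e, c)

def detect_question_text_column_alt (columns : List (List (String × String))) : Option String :=
  let st := columns.foldl pvAltStep (none, none)
  match st.1 with
  | some x => some x
  | none => st.2

-- ===== PRECONDITION & SPEC =====
-- Pre_ excludes exactly the inputs where A raises KeyError: a column dict without a 'name' key.
def Pre_detect_question_text_column (columns : List (List (String × String))) : Prop :=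
  (columns.all (fun col => (PySem.Dict.mk col).contains "name")) = true
instance (columns : List (List (String × String))) : Decidable (Pre_detect_question_text_column columns) := by unfold Pre_detect_question_text_column; infer_instance

def pvWitness_detect_question_text_column : (List (List (String × String))) :=
  [[("name", "Question ID")], [("name", "Prompt")]]

def Spec_detect_question_text_column (columns : List (List (String × String))) (out : Option String) : Prop := out = detect_question_text_column_alt columns
instance (columns : List (List (String × String))) (out : Option String) : Decidable (Spec_detect_question_text_column columns out) := by unfold Spec_detect_question_text_column; infer_instance

-- ===== CLAIM (what is proved, stated in full; the proofs are below) =====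
def Claim_equal_detect_question_text_column : Prop := ∀ (columns : List (List (String × String))), Dom_detect_question_text_column columns → Pre_detect_question_text_column columns → Spec_detect_question_text_column columns (detect_question_text_column columns)

-- ===== LEMMAS AND PROOFS =====

def pvCandP (col : List (String × String)) : Bool :=
  ["question_text", "question", "prompt", "text"].any
    (fun term => PySem.Str.isIn term (PySem.Str.lower (pvName col)))

lemma pvCandStep_eq (acc : List String) (col : List (String × String)) :
    pvCandStep acc col = if pvCandP col then acc ++ [pvName col] else acc := rfl

lemma pvExact_eq (col : List (String × String)) :
    (PySem.Set.ofList ["question_text", "text", "prompt"]).contains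
      (PySem.Str.lower (pvName col)) = pvExactP col := by
  simp [pvExactP, PySem.Set.contains_eq_listContains]

lemma cand_fold (cols : List (List (String × String))) (acc : List String) :
    cols.foldl pvCandStep acc
    = acc ++ cols.filterMap (fun col => if pvCandP col then some (pvName col) else none) := by
  induction cols generalizing acc with
  | nil => simp
  | cons c cs ih =>
    rw [List.foldl_cons, List.filterMap_cons, pvCandStep_eq]
    by_cases h : pvCandP c = true
    · simp [h, ih]
    · simp [h, ih]

lemma alt_fold (cols : List (List (String × String))) (e c : Option String) :
    cols.foldl pvAltStep (e, c)
    = (e.or ((cols.find? pvExactP).map pvName),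
       c.or ((cols.filterMap (fun col => if pvCandP col then some (pvName col) else none)).head?)) := by
  induction cols generalizing e c with
  | nil => simp
  | cons col cs ih =>
    have step : pvAltStep (e, c) col
        = ((if e.isNone && pvExactP col then some (pvName col) else e),
           (if c.isNone && pvCandP col then some (pvName col) else c)) := by
      simp only [pvAltStep, pvExact_eq]
      rfl
    rw [List.foldl_cons, List.find?_cons, List.filterMap_cons, step, ih]
    cases e <;> cases c <;>
      by_cases hE : pvExactP col = true <;>
      by_cases hC : pvCandP col = true <;>
        simp_all

-- ===== VERDICT (by name: the statement is the Claim_ definition above) =====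
theorem detect_question_text_column_spec : Claim_equal_detect_question_text_column := by
  intro columns _ _
  show detect_question_text_column columns = detect_question_text_column_alt columns
  simp only [detect_question_text_column, detect_question_text_column_alt,
    cand_fold, alt_fold, List.nil_append, Option.none_or]
  cases h : columns.find? pvExactP with
  | none => simp
  | some col => simp
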